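-- pv_equiv track=rewrite | github.com/Andrii-Samiilenko/Cursor-Hack | backend/compressor.py | _lines_with_keywords
-- ===== SOURCE A (Python) =====
-- WINDOW = 3  # lines around a keyword hit
--
-- def _lines_with_keywords(content: str, keywords: list[str]) -> set[int]:
--     lines = content.splitlines()
--     hit: set[int] = set()
--     for i, line in enumerate(lines):
--         low = line.lower()
--         if any(k in low for k in keywords):
--             for j in range(max(0, i - WINDOW), min(len(lines), i + WINDOW + 1)):
--                 hit.add(j)
--     return hit
-- ===== SOURCE B (Python) =====
-- WINDOW = 3  # lines around a keyword hit
--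
--
-- def _lines_with_keywords(content: str, keywords: list[str]) -> set[int]:
--     # Output-centric: a line index j belongs to the result iff some line within
--     # WINDOW of j contains a keyword (no window stamping, no deduplication).
--     lines = content.splitlines()
--     n = len(lines)
--     hit = [any(k in line.lower() for k in keywords) for line in lines]
--     return {j for j in range(n)
--             if any(hit[i] for i in range(max(0, j - WINDOW), min(n, j + WINDOW + 1)))}
-- ===== Notes on version B (the rewrite author's own statement) =====
-- stated objective: alternative
-- what changed: A is hit-centric: for every line containing a keyword it stamps all indices of its +/-WINDOW window into a set; B is output-centric: it computes a boolean hit mask once and then, for each line index j, includes j iff the mask is true anywhere in [j-WINDOW, j+WINDOW] -- the quantifier direction is inverted and no set insertion or window stamping happens.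
import Mathlib
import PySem

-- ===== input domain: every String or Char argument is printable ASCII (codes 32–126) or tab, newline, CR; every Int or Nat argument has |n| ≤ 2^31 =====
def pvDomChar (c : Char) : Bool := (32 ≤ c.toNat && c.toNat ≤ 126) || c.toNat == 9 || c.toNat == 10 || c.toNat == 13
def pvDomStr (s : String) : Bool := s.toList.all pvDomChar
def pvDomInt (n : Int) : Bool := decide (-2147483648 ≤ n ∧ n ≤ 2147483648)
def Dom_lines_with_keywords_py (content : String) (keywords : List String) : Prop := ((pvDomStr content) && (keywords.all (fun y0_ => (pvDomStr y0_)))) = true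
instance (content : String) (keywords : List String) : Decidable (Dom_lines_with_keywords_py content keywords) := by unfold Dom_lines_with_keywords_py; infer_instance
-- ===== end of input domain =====

-- B inverts the quantifier: it computes a boolean hit mask once and keeps index j
-- iff the mask is true somewhere in [j-3, j+3], instead of A's stamping every hit
-- line's window into a set (objective: alternative).


-- ===== PORT A =====
def lines_with_keywords_py (content : String) (keywords : List String) : List Int :=
  let lines := PySem.Str.splitlines content
  (PySem.List.enumerate lines).foldl
    (fun hit p =>
      let low := PySem.Str.lower p.2
      if keywords.any (fun k => PySem.Str.isIn k low) then
        (PySem.List.pyRange (max 0 (p.1 - 3)) (min (PySem.List.len lines) (p.1 + 3 + 1))).foldl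
          (fun hit j => PySem.Set.add hit j) hit
      else hit)
    PySem.Set.empty

-- ===== PORT B =====
-- hit[i] indexing: i always lies in [0, n), so pyGetD with default false is exact
def lines_with_keywords_py_alt (content : String) (keywords : List String) : List Int :=
  let lines := PySem.Str.splitlines content
  let n := PySem.List.len lines
  let hit := lines.map (fun line => keywords.any (fun k => PySem.Str.isIn k (PySem.Str.lower line)))
  PySem.Set.ofList ((PySem.List.pyRange 0 n).filter
    (fun j => (PySem.List.pyRange (max 0 (j - 3)) (min n (j + 3 + 1))).any
      (fun i => PySem.List.pyGetD hit i false)))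

-- ===== PRECONDITION & SPEC =====
def Spec_lines_with_keywords_py (content : String) (keywords : List String) (out : List Int) : Prop := out = lines_with_keywords_py_alt content keywords
instance (content : String) (keywords : List String) (out : List Int) : Decidable (Spec_lines_with_keywords_py content keywords out) := by unfold Spec_lines_with_keywords_py; infer_instance

-- ===== CLAIM (what is proved, stated in full; the proofs are below) =====
def Claim_equal_lines_with_keywords_py : Prop := ∀ (content : String) (keywords : List String), Dom_lines_with_keywords_py content keywords → Spec_lines_with_keywords_py content keywords (lines_with_keywords_py content keywords)

-- ===== LEMMAS AND PROOFS =====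

-- A's window-insertion loop over one hit line i
def pvAddWin (n : Int) (s : List Int) (i : Int) : List Int :=
  (PySem.List.pyRange (max 0 (i - 3)) (min n (i + 3 + 1))).foldl
    (fun hit j => PySem.Set.add hit j) s

-- the union of the windows of the (sorted) hit lines, as merged sorted intervals
def pvMerge (n : Int) (nxt : Int) : List Int → List Int
  | [] => []
  | i :: t => PySem.List.pyRange (max (max nxt (i - 3)) 0) (min n (i + 3 + 1)) ++
      pvMerge n (min n (i + 3 + 1)) t

-- a guarded fold is the fold over the filtered, projected list
theorem pv_foldl_if_filter_map {α β γ : Type} (P : α → Bool) (g : α → β) (f : γ → β → γ) :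
    ∀ (l : List α) (init : γ),
      l.foldl (fun s x => if P x then f s (g x) else s) init
        = ((l.filter P).map g).foldl f init := by
  intro l
  induction l with
  | nil => intro init; rfl
  | cons x t ih =>
    intro init
    by_cases h : P x = true <;> simp [h, ih]

-- membership in a fold of set insertions
theorem pv_mem_foldl_add (l : List Int) : ∀ (s : List Int) (j : Int),
    (j ∈ l.foldl (fun hit j => PySem.Set.add hit j) s) ↔ j ∈ s ∨ j ∈ l := by
  induction l with
  | nil => intro s j; simp
  | cons x t ih =>
    intro s j
    simp only [List.foldl_cons, ih, PySem.Set.mem_add, List.mem_cons]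
    tauto

-- membership in A's nested fold: j was stamped by the window of some hit line
theorem pv_mem_foldl_addwin (n : Int) (hits : List Int) : ∀ (s : List Int) (j : Int),
    (j ∈ hits.foldl (pvAddWin n) s) ↔
      j ∈ s ∨ ∃ i ∈ hits, max 0 (i - 3) ≤ j ∧ j < min n (i + 3 + 1) := by
  induction hits with
  | nil => intro s j; simp
  | cons i t ih =>
    intro s j
    simp only [List.foldl_cons, ih, pvAddWin, pv_mem_foldl_add, PySem.List.mem_pyRange_one,
      List.mem_cons]
    constructor
    · rintro ((hs | hr) | ⟨i', hi', h1, h2⟩)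
      · exact Or.inl hs
      · exact Or.inr ⟨i, Or.inl rfl, hr.1, hr.2⟩
      · exact Or.inr ⟨i', Or.inr hi', h1, h2⟩
    · rintro (hs | ⟨i', (rfl | hi'), h1, h2⟩)
      · exact Or.inl (Or.inl hs)
      · exact Or.inl (Or.inr ⟨h1, h2⟩)
      · exact Or.inr ⟨i', hi', h1, h2⟩

-- adding elements that are all already present is a no-op
theorem pv_foldl_add_noop (l : List Int) : ∀ (s : List Int), (∀ j ∈ l, j ∈ s) →
    l.foldl (fun hit j => PySem.Set.add hit j) s = s := by
  induction l with
  | nil => intro s _; rfl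
  | cons x t ih =>
    intro s h
    have hx : PySem.Set.add s x = s := by
      simp [PySem.Set.add, PySem.Set.contains, h x (by simp)]
    simp only [List.foldl_cons, hx]
    exact ih s (fun j hj => h j (by simp [hj]))

-- adding distinct fresh elements appends them
theorem pv_foldl_add_fresh (l : List Int) : ∀ (s : List Int), l.Nodup → (∀ j ∈ l, j ∉ s) →
    l.foldl (fun hit j => PySem.Set.add hit j) s = s ++ l := by
  induction l with
  | nil => intro s _ _; simp
  | cons x t ih =>
    intro s hnd h
    have hx : PySem.Set.add s x = s ++ [x] := by
      simp [PySem.Set.add, PySem.Set.contains, h x (by simp)]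
    simp only [List.foldl_cons, hx]
    rw [ih (s ++ [x]) (List.Nodup.of_cons hnd)]
    · simp
    · intro j hj
      simp only [List.mem_append, List.mem_singleton]
      rintro (hs | rfl)
      · exact h j (by simp [hj]) hs
      · exact (List.nodup_cons.mp hnd).1 hj

-- core invariant: A's insertion fold emits the merged sorted intervals
theorem pv_core (n : Int) (hn : 0 ≤ n) (hits : List Int) :
    hits.Pairwise (· < ·) → (∀ i ∈ hits, 0 ≤ i ∧ i < n) →
    ∀ (p : Int) (s : List Int),
      (∀ i ∈ hits, p < i) →
      (∀ x ∈ s, x < min n (p + 4)) →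
      (∀ j : Int, max 0 (p - 3) ≤ j → j < min n (p + 4) → j ∈ s) →
      hits.foldl (pvAddWin n) s = s ++ pvMerge n (min n (p + 4)) hits := by
  induction hits with
  | nil => intro _ _ p s _ _ _; simp [pvMerge]
  | cons i t ih =>
    intro hpw hmem p s hp h1 h2
    obtain ⟨hi0, hin⟩ := hmem i (by simp)
    have hpi : p < i := hp i (by simp)
    set nxt := min n (p + 4) with hnxt
    set lo0 := max 0 (i - 3) with hlo0
    set hi := min n (i + 3 + 1) with hhi
    have hnxt_hi : nxt ≤ hi := by omega
    have hlo0_hi : lo0 ≤ hi := by omega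
    have hsplit : PySem.List.pyRange lo0 hi =
        PySem.List.pyRange lo0 (max nxt lo0) ++ PySem.List.pyRange (max nxt lo0) hi :=
      PySem.List.pyRange_one_append lo0 (max nxt lo0) hi (by omega) (by omega)
    have hstep : pvAddWin n s i = s ++ PySem.List.pyRange (max nxt lo0) hi := by
      rw [pvAddWin, ← hlo0, ← hhi, hsplit, List.foldl_append]
      rw [pv_foldl_add_noop _ s]
      · exact pv_foldl_add_fresh _ s (PySem.List.nodup_pyRange_one _ _)
          (fun j hj hjs => by
            have := PySem.List.mem_pyRange_one.mp hj
            have := h1 j hjs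
            omega)
      · intro j hj
        have hb := PySem.List.mem_pyRange_one.mp hj
        exact h2 j (by omega) (by omega)
    simp only [List.foldl_cons, hstep]
    rw [ih (List.Pairwise.of_cons hpw) (fun x hx => hmem x (by simp [hx])) i
        (s ++ PySem.List.pyRange (max nxt lo0) hi)
        (fun x hx => List.rel_of_pairwise_cons hpw hx)
        ?_ ?_]
    · have : min n (i + 4) = hi := by omega
      simp only [pvMerge, List.append_assoc, this]
      have hmax : max (max nxt (i - 3)) 0 = max nxt lo0 := by omega
      rw [hmax]
    · intro x hx
      rcases List.mem_append.mp hx with hxs | hxr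
      · have := h1 x hxs; omega
      · have := PySem.List.mem_pyRange_one.mp hxr; omega
    · intro j hj1 hj2
      by_cases hjn : j < nxt
      · exact List.mem_append_left _ (h2 j (by omega) (by omega))
      · exact List.mem_append_right _ (PySem.List.mem_pyRange_one.mpr (by omega))

-- the merged intervals are bounded below by the cursor and strictly increasing
theorem pv_merge_sorted (n : Int) : ∀ (hits : List Int) (nxt : Int),
    hits.Pairwise (· < ·) → (∀ i ∈ hits, nxt ≤ min n (i + 3 + 1)) →
    (∀ x ∈ pvMerge n nxt hits, nxt ≤ x) ∧ (pvMerge n nxt hits).Pairwise (· < ·) := by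
  intro hits
  induction hits with
  | nil => intro nxt _ _; simp [pvMerge]
  | cons i t ih =>
    intro nxt hpw hb
    have hnh : nxt ≤ min n (i + 3 + 1) := hb i (by simp)
    have ht := ih (min n (i + 3 + 1)) (List.Pairwise.of_cons hpw)
      (fun i' hi' => by
        have := List.rel_of_pairwise_cons hpw hi'
        have := hb i' (by simp [hi'])
        omega)
    constructor
    · intro x hx
      rcases List.mem_append.mp hx with hxr | hxm
      · have := PySem.List.mem_pyRange_one.mp hxr; omega
      · have := ht.1 x hxm; omega
    · refine List.pairwise_append.mpr ⟨PySem.List.pairwise_lt_pyRange_one _ _, ht.2, ?_⟩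
      intro x hxr y hym
      have := PySem.List.mem_pyRange_one.mp hxr
      have := ht.1 y hym
      omega

-- two strictly increasing lists with the same members are equal
theorem pv_sorted_ext : ∀ (l₁ l₂ : List Int), l₁.Pairwise (· < ·) → l₂.Pairwise (· < ·) →
    (∀ x, x ∈ l₁ ↔ x ∈ l₂) → l₁ = l₂ := by
  intro l₁
  induction l₁ with
  | nil =>
    intro l₂ _ _ h
    cases l₂ with
    | nil => rfl
    | cons b t => exact absurd ((h b).mpr (by simp)) (by simp)
  | cons a t ih =>
    intro l₂ h₁ h₂ h
    cases l₂ with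
    | nil => exact absurd ((h a).mp (by simp)) (by simp)
    | cons b t₂ =>
      have hab : a = b := by
        have ha := (h a).mp (by simp)
        have hb := (h b).mpr (by simp)
        simp only [List.mem_cons] at ha hb
        rcases ha with rfl | ha
        · rfl
        · rcases hb with heq | hb
          · exact heq.symm
          · have h1 := List.rel_of_pairwise_cons h₁ hb
            have h2 := List.rel_of_pairwise_cons h₂ ha
            omega
      subst hab
      congr 1
      refine ih t₂ (List.Pairwise.of_cons h₁) (List.Pairwise.of_cons h₂) (fun x => ?_)
      constructor
      · intro hx
        have hax : a < x := List.rel_of_pairwise_cons h₁ hx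
        rcases List.mem_cons.mp ((h x).mp (List.mem_cons_of_mem a hx)) with rfl | hx2
        · omega
        · exact hx2
      · intro hx
        have hax : a < x := List.rel_of_pairwise_cons h₂ hx
        rcases List.mem_cons.mp ((h x).mpr (List.mem_cons_of_mem a hx)) with rfl | hx2
        · omega
        · exact hx2

-- ===== VERDICT (by name: the statement is the Claim_ definition above) =====
theorem lines_with_keywords_py_spec : Claim_equal_lines_with_keywords_py := by
  intro content keywords _
  show lines_with_keywords_py content keywords = lines_with_keywords_py_alt content keywords
  simp only [lines_with_keywords_py, lines_with_keywords_py_alt]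
  set L := PySem.Str.splitlines content with hL
  set n := PySem.List.len L with hn
  set Pb : String → Bool := fun line => keywords.any (fun k => PySem.Str.isIn k (PySem.Str.lower line)) with hPb
  set P : Int × String → Bool := fun p => Pb p.2 with hP
  set hits := ((PySem.List.enumerate L).filter P).map (·.1) with hhits
  have hn0 : 0 ≤ n := by simp [hn, PySem.List.len_eq]
  have hnlen : n = (L.length : Int) := by simp [hn, PySem.List.len_eq]
  -- A's fold over enumerate with the guard = fold of pvAddWin over the hit indices
  have hAfold : (PySem.List.enumerate L).foldl
      (fun hit p =>
        if P p then
          (PySem.List.pyRange (max 0 (p.1 - 3)) (min n (p.1 + 3 + 1))).foldl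
            (fun hit j => PySem.Set.add hit j) hit
        else hit) PySem.Set.empty
      = hits.foldl (pvAddWin n) [] :=
    pv_foldl_if_filter_map P (·.1) (pvAddWin n) (PySem.List.enumerate L) PySem.Set.empty
  have hpw : hits.Pairwise (· < ·) := by
    refine List.Pairwise.map _ (fun a b h => h) ?_
    exact List.Pairwise.filter _ (PySem.List.pairwise_lt_enumerate L 0)
  have hmem : ∀ i ∈ hits, 0 ≤ i ∧ i < n := by
    intro i hi
    simp only [hhits, List.mem_map] at hi
    obtain ⟨p, hpf, rfl⟩ := hi
    have hpe := List.mem_of_mem_filter hpf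
    obtain ⟨k, hk, rfl⟩ := (PySem.List.mem_enumerate_iff _ _ _).mp hpe
    simp [hnlen]
    omega
  -- membership in hits = the hit mask is true there
  have hmask : ∀ i : Int, 0 ≤ i → i < n →
      (PySem.List.pyGetD (L.map Pb) i false = true ↔ i ∈ hits) := by
    intro i hi0 hin
    have hilen : i.toNat < L.length := by omega
    rw [PySem.List.pyGetD_eq_getElem _ _ hi0 (by simp only [List.length_map]; exact hnlen ▸ hin)]
    rw [List.getElem_map]
    constructor
    · intro hPk
      simp only [hhits, List.mem_map]
      refine ⟨((i.toNat : Int), L[i.toNat]), ?_, by omega⟩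
      refine List.mem_filter.mpr ⟨?_, ?_⟩
      · exact (PySem.List.mem_enumerate_iff _ _ _).mpr ⟨i.toNat, hilen, by simp⟩
      · simpa [hP] using hPk
    · intro hi
      simp only [hhits, List.mem_map] at hi
      obtain ⟨p, hpf, hp1⟩ := hi
      obtain ⟨hpe, hpP⟩ := List.mem_filter.mp hpf
      obtain ⟨k, hk, rfl⟩ := (PySem.List.mem_enumerate_iff _ _ _).mp hpe
      simp only [hP] at hpP
      have hki : k = i.toNat := by simp at hp1; omega
      subst hki
      simpa using hpP
  -- A's side: the fold is the merged intervals, hence strictly increasing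
  have hcore := pv_core n hn0 hits hpw hmem (-4) []
    (fun i hi => by have := (hmem i hi).1; omega)
    (by simp)
    (by intro j h1 h2; omega)
  have hmin : min n (-4 + 4) = 0 := by omega
  rw [hmin] at hcore
  simp only [List.nil_append] at hcore
  have hAsorted : (hits.foldl (pvAddWin n) []).Pairwise (· < ·) := by
    rw [hcore]
    exact (pv_merge_sorted n hits 0 hpw
      (fun i hi => by have := hmem i hi; omega)).2
  -- B's side: the filtered range is strictly increasing, so Set.ofList is the identity
  set Bl := (PySem.List.pyRange 0 n).filter
      (fun j => (PySem.List.pyRange (max 0 (j - 3)) (min n (j + 3 + 1))).any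
        (fun i => PySem.List.pyGetD (L.map Pb) i false)) with hBl
  have hBsorted : Bl.Pairwise (· < ·) :=
    List.Pairwise.filter _ (PySem.List.pairwise_lt_pyRange_one 0 n)
  have hBset : PySem.Set.ofList Bl = Bl :=
    PySem.Set.ofList_eq_self_of_nodup Bl (hBsorted.imp (fun h => by omega)).nodup
  rw [hAfold, hBset]
  -- same members on both sides
  refine pv_sorted_ext _ _ hAsorted hBsorted (fun j => ?_)
  rw [pv_mem_foldl_addwin]
  simp only [hBl, List.mem_filter, PySem.List.mem_pyRange_one, List.any_eq_true]
  constructor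
  · rintro (hj | ⟨i, hi, h1, h2⟩)
    · simp at hj
    · obtain ⟨hi0, hin⟩ := hmem i hi
      refine ⟨⟨by omega, by omega⟩, i, ⟨by omega, by omega⟩, ?_⟩
      exact (hmask i hi0 hin).mpr hi
  · rintro ⟨⟨hj0, hjn⟩, i, ⟨hb1, hb2⟩, hit⟩
    have hi0 : 0 ≤ i := by omega
    have hin : i < n := by omega
    have hih : i ∈ hits := (hmask i hi0 hin).mp hit
    exact Or.inr ⟨i, hih, by omega, by omega⟩
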